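-- pv_equiv track=rewrite | github.com/lilycyf/TimetableGenerator | time manager.py | timetableGenerator
-- ===== SOURCE A (Python) =====
-- def timetableGenerator(dict, after, before):
--
--     timetables = []
--
--     size = 0
--
--     for course in list(dict.keys()):
--         #get the time periods for this course
--         times = dict[course]
--
--         #expend timetables with possible time periods for this course
--         if course == list(dict.keys())[0]:
--             for time in times:
--                 if filter(time, after, before):
--                     course_time = (course, time)
--                     timetables.append([course_time])
--
--         elif(size != 0):
--             for i in range(0, size):
--                 temp = timetables[0]
--                 del(timetables[0])
--                 for time in times:
--                     if filter(time, after, before):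
--                         course_time = (course, time)
--                         if(checkNewAddedItem(temp + [course_time])):
--                             timetables.append(temp + [course_time])
--
--         size = len(timetables)
--
--     return timetables
--
-- def filter(c, after, before):
--     for t in c:
--         if (t[1] < after or t[2] > before):
--             return False
--     return True
--
-- def checkNewAddedItem(x):
--     for i in range(0, len(x)-1):
--         if(not checkTwoClasses(x[i], x[-1])):
--             return False
--     return True
--
-- def checkTwoClasses(c1, c2):
--     for time1 in c1[1]:
--         for time2 in c2[1]:
--             if (time1[0] == time2[0] and time1[1]<time2[2] and time1[1]>=time2[1]) or \
--             (time1[0] == time2[0] and time1[2]<=time2[2] and time1[2]>time2[1]):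
--                 return False
--     return True
-- ===== SOURCE B (Python) =====
-- def timetableGenerator(dict, after, before):
--     # precompute the valid (filtered) time options per course, then
--     # enumerate conflict-free combinations by recursive backtracking
--     items = [(course, [t for t in times if _fits(t, after, before)])
--              for course, times in dict.items()]
--     if not items:
--         return []
--     out = []
--
--     def extend(chosen, i):
--         if i == len(items):
--             out.append(list(chosen))
--             return
--         course, times = items[i]
--         for t in times:
--             ct = (course, t)
--             if all(_compatible(prev, ct) for prev in chosen):
--                 chosen.append(ct)
--                 extend(chosen, i + 1)
--                 chosen.pop()
--
--     extend([], 0)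
--     return out
--
--
-- def _fits(c, after, before):
--     return all(after <= t[1] and t[2] <= before for t in c)
--
--
-- def _compatible(c1, c2):
--     for d1, s1, e1 in c1[1]:
--         for d2, s2, e2 in c2[1]:
--             if d1 == d2 and (s2 <= s1 < e2 or s2 < e1 <= e2):
--                 return False
--     return True
-- ===== Notes on version B (the rewrite author's own statement) =====
-- stated objective: alternative
-- what changed: A grows a breadth-first queue of partial timetables course by course, popping with `del timetables[0]` and re-running filter(time, after, before) on every course's times once per surviving partial; B filters each course's times once up front and enumerates conflict-free combinations by recursive backtracking over the courses.
import Mathlib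
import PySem

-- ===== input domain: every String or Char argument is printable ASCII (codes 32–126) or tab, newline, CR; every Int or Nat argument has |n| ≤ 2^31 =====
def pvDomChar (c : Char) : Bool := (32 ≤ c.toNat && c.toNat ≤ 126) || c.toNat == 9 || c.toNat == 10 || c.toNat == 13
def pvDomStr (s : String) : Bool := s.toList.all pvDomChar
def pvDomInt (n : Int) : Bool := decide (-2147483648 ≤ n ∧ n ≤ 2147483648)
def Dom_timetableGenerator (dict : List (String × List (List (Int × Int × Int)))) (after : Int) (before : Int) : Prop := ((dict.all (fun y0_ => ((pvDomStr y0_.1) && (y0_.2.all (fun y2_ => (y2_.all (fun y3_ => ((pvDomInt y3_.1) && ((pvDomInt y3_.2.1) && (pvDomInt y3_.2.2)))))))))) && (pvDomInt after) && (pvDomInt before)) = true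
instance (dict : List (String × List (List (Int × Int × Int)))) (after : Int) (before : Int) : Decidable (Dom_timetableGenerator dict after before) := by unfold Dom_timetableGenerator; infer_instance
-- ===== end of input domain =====

-- B replaces A's breadth-first queue (with its repeated `del timetables[0]` pops and per-partial
-- re-filtering of every course's times) by per-course pre-filtering plus recursive backtracking;
-- return values only (neither program mutates its arguments).

-- ===== PORT A =====
def pyFilter (c : List (Int × Int × Int)) (after before : Int) : Bool :=
  c.all (fun t => !(decide (t.2.1 < after) || decide (t.2.2 > before)))

def checkTwoClasses (c1 c2 : String × List (Int × Int × Int)) : Bool :=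
  c1.2.all (fun t1 => c2.2.all (fun t2 =>
    !((t1.1 == t2.1 && decide (t1.2.1 < t2.2.2) && decide (t1.2.1 ≥ t2.2.1)) ||
      (t1.1 == t2.1 && decide (t1.2.2 ≤ t2.2.2) && decide (t1.2.2 > t2.2.1)))))

def checkNewAddedItem (x : List (String × List (Int × Int × Int))) : Bool :=
  (List.range (x.length - 1)).all (fun i =>
    checkTwoClasses (x.getD i ("", [])) ((x.getLast?).getD ("", [])))

-- the `for i in range(0, size): temp = timetables[0]; del(timetables[0]); …` pass
def stepA (course : String) (times : List (List (Int × Int × Int))) (after before : Int) :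
    Nat → List (List (String × List (Int × Int × Int))) → List (List (String × List (Int × Int × Int)))
  | 0, tts => tts
  | n+1, tts =>
      let temp := tts.headI
      let tts1 := tts.tail
      let tts2 := times.foldl (fun acc time =>
        if pyFilter time after before && checkNewAddedItem (temp ++ [(course, time)])
        then acc ++ [temp ++ [(course, time)]] else acc) tts1
      stepA course times after before n tts2

def timetableGenerator (dict : List (String × List (List (Int × Int × Int)))) (after : Int) (before : Int) : List (List (String × (List (Int × Int × Int)))) :=
  let keys := dict.map Prod.fst
  (keys.foldl (fun (st : List (List (String × List (Int × Int × Int))) × Nat) course =>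
      let times := ((dict.find? (fun p => p.1 == course)).map Prod.snd).getD []
      let tts :=
        if course == keys.headI then
          times.foldl (fun acc time =>
            if pyFilter time after before then acc ++ [[(course, time)]] else acc) st.1
        else if st.2 ≠ 0 then stepA course times after before st.2 st.1
        else st.1
      (tts, tts.length)) ([], 0)).1

-- ===== PORT B =====
def fits (c : List (Int × Int × Int)) (after before : Int) : Bool :=
  c.all (fun t => decide (after ≤ t.2.1) && decide (t.2.2 ≤ before))

def compatible (c1 c2 : String × List (Int × Int × Int)) : Bool :=
  c1.2.all (fun t1 => c2.2.all (fun t2 =>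
    !(t1.1 == t2.1 &&
      ((decide (t2.2.1 ≤ t1.2.1) && decide (t1.2.1 < t2.2.2)) ||
       (decide (t2.2.1 < t1.2.2) && decide (t1.2.2 ≤ t2.2.2))))))

def okWith (chosen : List (String × List (Int × Int × Int))) (ct : String × List (Int × Int × Int)) : Bool :=
  chosen.all (fun prev => compatible prev ct)

-- Source B's `extend(chosen, i)` — index recursion ported as structural recursion on the remaining items
def extendB : List (String × List (Int × Int × Int)) → List (String × List (List (Int × Int × Int))) → List (List (String × List (Int × Int × Int)))
  | chosen, [] => [chosen]
  | chosen, (course, times) :: rest =>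
      times.foldl (fun out t =>
        if okWith chosen (course, t) then out ++ extendB (chosen ++ [(course, t)]) rest else out) []

def timetableGenerator_alt (dict : List (String × List (List (Int × Int × Int)))) (after : Int) (before : Int) : List (List (String × (List (Int × Int × Int)))) :=
  let items := dict.map (fun p => (p.1, p.2.filter (fun t => fits t after before)))
  if items.isEmpty then [] else extendB [] items

-- ===== PRECONDITION & SPEC =====
-- Pre_ excludes association lists with duplicate course keys: a Python dict cannot hold two
-- entries with the same key, so such lists represent no Python input of A at all.
def Pre_timetableGenerator (dict : List (String × List (List (Int × Int × Int)))) (after : Int) (before : Int) : Prop :=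
  (dict.map Prod.fst).Nodup
instance (dict : List (String × List (List (Int × Int × Int)))) (after : Int) (before : Int) : Decidable (Pre_timetableGenerator dict after before) := by unfold Pre_timetableGenerator; infer_instance

def pvWitness_timetableGenerator : (List (String × List (List (Int × Int × Int)))) × Int × Int :=
  ([("a", [[(0, 1, 2)]]), ("b", [[(0, 2, 3)]])], 0, 10)

def Spec_timetableGenerator (dict : List (String × List (List (Int × Int × Int)))) (after : Int) (before : Int) (out : List (List (String × (List (Int × Int × Int))))) : Prop := out = timetableGenerator_alt dict after before
instance (dict : List (String × List (List (Int × Int × Int)))) (after : Int) (before : Int) (out : List (List (String × (List (Int × Int × Int))))) : Decidable (Spec_timetableGenerator dict after before out) := by unfold Spec_timetableGenerator; infer_instance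

-- ===== CLAIM (what is proved, stated in full; the proofs are below) =====
def Claim_equal_timetableGenerator : Prop := ∀ (dict : List (String × List (List (Int × Int × Int)))) (after : Int) (before : Int), Dom_timetableGenerator dict after before → Pre_timetableGenerator dict after before → Spec_timetableGenerator dict after before (timetableGenerator dict after before)

-- ===== LEMMAS AND PROOFS =====

-- the two slot-overlap tests agree
lemma slot_eq (t1 t2 : Int × Int × Int) :
    (!((t1.1 == t2.1 && decide (t1.2.1 < t2.2.2) && decide (t1.2.1 ≥ t2.2.1)) ||
       (t1.1 == t2.1 && decide (t1.2.2 ≤ t2.2.2) && decide (t1.2.2 > t2.2.1))))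
    = (!(t1.1 == t2.1 &&
        ((decide (t2.2.1 ≤ t1.2.1) && decide (t1.2.1 < t2.2.2)) ||
         (decide (t2.2.1 < t1.2.2) && decide (t1.2.2 ≤ t2.2.2))))) := by
  rw [Bool.eq_iff_iff]
  by_cases h : t1.1 = t2.1 <;> simp [h] <;> omega

lemma compatible_eq (c1 c2 : String × List (Int × Int × Int)) :
    compatible c1 c2 = checkTwoClasses c1 c2 := by
  unfold compatible checkTwoClasses
  exact congrArg _ (funext fun t1 => congrArg _ (funext fun t2 => (slot_eq t1 t2).symm))

lemma fits_eq (c : List (Int × Int × Int)) (after before : Int) :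
    fits c after before = pyFilter c after before := by
  unfold fits pyFilter
  refine congrArg _ (funext fun t => ?_)
  by_cases h1 : t.2.1 < after <;> by_cases h2 : t.2.2 > before <;> simp [h1, h2] <;> omega

lemma checkNew_eq (temp : List (String × List (Int × Int × Int))) (ct : String × List (Int × Int × Int)) :
    checkNewAddedItem (temp ++ [ct]) = okWith temp ct := by
  unfold checkNewAddedItem okWith
  rw [Bool.eq_iff_iff]
  simp only [List.all_eq_true, List.mem_range, List.length_append, List.length_singleton,
    Nat.add_sub_cancel, List.getLast?_concat, Option.getD_some]
  constructor
  · intro h prev hprev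
    obtain ⟨i, hi, rfl⟩ := List.mem_iff_getElem.mp hprev
    have := h i hi
    rw [List.getD_eq_getElem?_getD, List.getElem?_append_left hi, List.getElem?_eq_getElem hi,
      Option.getD_some] at this
    rw [compatible_eq]
    exact this
  · intro h i hi
    rw [List.getD_eq_getElem?_getD, List.getElem?_append_left hi, List.getElem?_eq_getElem hi,
      Option.getD_some, ← compatible_eq]
    exact h _ (List.getElem_mem hi)

-- one extension step of one partial timetable, as A computes it
def extA (after before : Int) (it : String × List (List (Int × Int × Int)))
    (temp : List (String × List (Int × Int × Int))) : List (List (String × List (Int × Int × Int))) :=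
  (it.2.filter (fun t => pyFilter t after before && okWith temp (it.1, t))).map
    (fun t => temp ++ [(it.1, t)])

-- A's loop body (definitionally the lambda inside timetableGenerator)
def bodyA (dict : List (String × List (List (Int × Int × Int)))) (after before : Int) (h0 : String)
    (st : List (List (String × List (Int × Int × Int))) × Nat) (course : String) :
    List (List (String × List (Int × Int × Int))) × Nat :=
  let times := ((dict.find? (fun p => p.1 == course)).map Prod.snd).getD []
  let tts :=
    if course == h0 then
      times.foldl (fun acc time =>
        if pyFilter time after before then acc ++ [[(course, time)]] else acc) st.1
    else if st.2 ≠ 0 then stepA course times after before st.2 st.1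
    else st.1
  (tts, tts.length)

lemma stepA_spec (course : String) (times : List (List (Int × Int × Int))) (after before : Int) :
    ∀ (n : Nat) (tts : List (List (String × List (Int × Int × Int)))), n ≤ tts.length →
      stepA course times after before n tts
        = tts.drop n ++ (tts.take n).flatMap (extA after before (course, times)) := by
  intro n
  induction n with
  | zero => intro tts _; simp [stepA]
  | succ n ih =>
    intro tts hlen
    match tts with
    | [] => simp at hlen
    | temp :: rest =>
      simp only [stepA, List.headI, List.tail_cons]
      have hbody : (fun acc time =>
          if pyFilter time after before && checkNewAddedItem (temp ++ [(course, time)])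
          then acc ++ [temp ++ [(course, time)]] else acc)
          = (fun acc time =>
          if pyFilter time after before && okWith temp (course, time)
          then acc ++ [temp ++ [(course, time)]] else acc) := by
        funext acc time; rw [checkNew_eq]
      rw [hbody, PySem.List.foldl_append_if]
      have hle : n ≤ rest.length := by simpa using hlen
      rw [ih _ (by simpa using Nat.le_add_right_of_le hle)]
      simp only [List.drop_append_of_le_length hle, List.take_append_of_le_length hle,
        List.drop_succ_cons, List.take_succ_cons, List.flatMap_cons]
      simp [extA, List.append_assoc]

lemma extendB_cons (chosen : List (String × List (Int × Int × Int))) (course : String)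
    (times : List (List (Int × Int × Int))) (rest : List (String × List (List (Int × Int × Int)))) :
    extendB chosen ((course, times) :: rest)
      = times.flatMap (fun t =>
          if okWith chosen (course, t) then extendB (chosen ++ [(course, t)]) rest else []) := by
  show times.foldl _ [] = _
  have : (fun out t => if okWith chosen (course, t) then out ++ extendB (chosen ++ [(course, t)]) rest else out)
      = (fun (out : List (List (String × List (Int × Int × Int)))) t =>
          out ++ (if okWith chosen (course, t) then extendB (chosen ++ [(course, t)]) rest else [])) := by
    funext out t; by_cases h : okWith chosen (course, t) <;> simp [h]
  rw [this, PySem.List.foldl_append_eq_flatMap]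
  rfl

lemma filter_flatMap_if {α β : Type} (l : List α) (p : α → Bool) (f : α → List β) :
    (l.filter p).flatMap f = l.flatMap (fun x => if p x then f x else []) := by
  induction l with
  | nil => rfl
  | cons x l ih => by_cases h : p x <;> simp [h, ih]

-- A's level-by-level pass over the remaining courses equals B's depth-first backtracking
lemma bfs_eq_dfs (after before : Int) :
    ∀ (items : List (String × List (List (Int × Int × Int))))
      (tts : List (List (String × List (Int × Int × Int)))),
      items.foldl (fun l it => l.flatMap (extA after before it)) tts
        = tts.flatMap (fun chosen =>
            extendB chosen (items.map (fun p => (p.1, p.2.filter (fun t => fits t after before))))) := by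
  intro items
  induction items with
  | nil => intro tts; simp [extendB]
  | cons it items ih =>
    intro tts
    rw [List.foldl_cons, ih, List.flatMap_assoc]
    obtain ⟨c, ts⟩ := it
    rw [List.map_cons]
    refine List.flatMap_congr (fun temp _ => ?_)
    rw [extendB_cons, ← filter_flatMap_if]
    unfold extA
    rw [List.flatMap_map, List.filter_filter]
    refine congrArg _ (List.filter_congr (fun t _ => ?_))
    simp only [fits_eq]
    exact Bool.and_comm _ _

-- lookup in a dup-free association list finds each entry's own value
lemma find_self {ν : Type} (dict : List (String × ν)) (hnd : (dict.map Prod.fst).Nodup) :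
    ∀ p ∈ dict, dict.find? (fun q => q.1 == p.1) = some p := by
  induction dict with
  | nil => intro p hp; simp at hp
  | cons q dict ih =>
    intro p hp
    rcases List.mem_cons.mp hp with rfl | hp'
    · simp [List.find?]
    · have hne : (q.1 == p.1) = false := by
        simp only [List.map_cons, List.nodup_cons] at hnd
        have : p.1 ∈ dict.map Prod.fst := List.mem_map.mpr ⟨p, hp', rfl⟩
        exact beq_eq_false_iff_ne.mpr (fun h => hnd.1 (h ▸ this))
      simp only [List.find?, hne]
      exact ih (by simp only [List.map_cons, List.nodup_cons] at hnd; exact hnd.2) p hp'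

-- A's fold over the remaining (non-first) courses, level by level
lemma foldA_suffix (dict : List (String × List (List (Int × Int × Int)))) (after before : Int)
    (h0 : String) :
    ∀ (rest : List (String × List (List (Int × Int × Int))))
      (tts : List (List (String × List (Int × Int × Int)))),
      (∀ p ∈ rest, (p.1 == h0) = false) →
      (∀ p ∈ rest, ((dict.find? (fun q => q.1 == p.1)).map Prod.snd).getD [] = p.2) →
      ((rest.map Prod.fst).foldl (bodyA dict after before h0) (tts, tts.length)).1
        = rest.foldl (fun l it => l.flatMap (extA after before it)) tts := by
  intro rest
  induction rest with
  | nil => intro tts _ _; rfl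
  | cons p rest ih =>
    intro tts hk hL
    obtain ⟨c, ts⟩ := p
    rw [List.map_cons, List.foldl_cons, List.foldl_cons]
    have hc : (c == h0) = false := hk (c, ts) (List.mem_cons_self ..)
    have hts : ((dict.find? (fun q => q.1 == c)).map Prod.snd).getD [] = ts :=
      hL (c, ts) (List.mem_cons_self ..)
    have hstep : bodyA dict after before h0 (tts, tts.length) c
        = (tts.flatMap (extA after before (c, ts)),
           (tts.flatMap (extA after before (c, ts))).length) := by
      unfold bodyA
      rw [hts, hc]
      simp only [Bool.false_eq_true, if_false]
      by_cases h0' : tts.length = 0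
      · have : tts = [] := List.length_eq_zero_iff.mp h0'
        subst this
        simp
      · rw [if_pos h0', stepA_spec c ts after before tts.length tts le_rfl]
        simp
    rw [hstep]
    exact ih (tts.flatMap (extA after before (c, ts)))
      (fun q hq => hk q (List.mem_cons_of_mem _ hq)) (fun q hq => hL q (List.mem_cons_of_mem _ hq))

-- ===== VERDICT (by name: the statement is the Claim_ definition above) =====
theorem timetableGenerator_spec : Claim_equal_timetableGenerator := by
  intro dict after before _ hpre
  unfold Spec_timetableGenerator
  match dict with
  | [] => rfl
  | (k0, ts0) :: rest =>
    show ((((k0, ts0) :: rest).map Prod.fst).foldl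
        (fun st course => bodyA ((k0, ts0) :: rest) after before k0 st course) ([], 0)).1
      = timetableGenerator_alt ((k0, ts0) :: rest) after before
    rw [List.map_cons, List.foldl_cons]
    have hfind0 : (((k0, ts0) :: rest).find? (fun p => p.1 == k0)) = some (k0, ts0) := by
      simp [List.find?]
    have hinit : bodyA ((k0, ts0) :: rest) after before k0 ([], 0) k0
        = ((ts0.filter (fun t => pyFilter t after before)).map (fun t => [(k0, t)]),
           ((ts0.filter (fun t => pyFilter t after before)).map (fun t => [(k0, t)])).length) := by
      unfold bodyA
      rw [hfind0]
      simp [PySem.List.foldl_append_if]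
    rw [show (fun st course => bodyA ((k0, ts0) :: rest) after before k0 st course)
        = bodyA ((k0, ts0) :: rest) after before k0 from rfl, hinit]
    have hk : ∀ p ∈ rest, (p.1 == k0) = false := by
      intro p hp
      have hnd := hpre
      unfold Pre_timetableGenerator at hnd
      simp only [List.map_cons, List.nodup_cons] at hnd
      exact beq_eq_false_iff_ne.mpr (fun h => hnd.1 (h ▸ List.mem_map.mpr ⟨p, hp, rfl⟩))
    have hL : ∀ p ∈ rest,
        ((((k0, ts0) :: rest).find? (fun q => q.1 == p.1)).map Prod.snd).getD [] = p.2 := by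
      intro p hp
      rw [find_self _ hpre p (List.mem_cons_of_mem _ hp)]
      rfl
    rw [foldA_suffix ((k0, ts0) :: rest) after before k0 rest _ hk hL]
    rw [bfs_eq_dfs]
    show _ = timetableGenerator_alt ((k0, ts0) :: rest) after before
    unfold timetableGenerator_alt
    simp only [List.map_cons, List.isEmpty_cons, Bool.false_eq_true, if_false]
    rw [extendB_cons]
    have hfl : ts0.filter (fun t => fits t after before)
        = ts0.filter (fun t => pyFilter t after before) :=
      List.filter_congr (fun t _ => fits_eq t after before)
    rw [hfl, List.flatMap_map]
    refine List.flatMap_congr (fun t _ => ?_)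
    simp [okWith]
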